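-- pv_equiv track=rewrite | github.com/kumaran-5555/ML | ML-Implementation/CRF.py | vectorizeLabels
-- ===== SOURCE A (Python) =====
-- def vectorizeLabels(labels):
--     labelNames = {}
--
--     for row in labels:
--         for l in row:
--             if l in labelNames:
--                 continue
--
--             labelNames[l] = len(labelNames)
--
--     vectorizedLabels = []
--     for row in labels:
--         vectorizedLabel = []
--         for l in row:
--             # we want ids of labels to start from 1
--             vectorizedLabel.append(labelNames[l]+1)
--         vectorizedLabels.append(vectorizedLabel)
--
--     return vectorizedLabels, len(labelNames)
-- ===== SOURCE B (Python) =====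
-- def vectorizeLabels(labels):
--     labelNames = {}
--     vectorizedLabels = []
--     for row in labels:
--         vectorizedLabels.append(
--             [labelNames.setdefault(l, len(labelNames)) + 1 for l in row])
--     return vectorizedLabels, len(labelNames)
-- ===== Notes on version B (the rewrite author's own statement) =====
-- stated objective: simpler
-- what changed: Single pass over the rows: each label's id is assigned on first sight via dict.setdefault while the row vector is built, instead of A's separate id-table-building pass followed by a second full traversal.
import Mathlib
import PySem

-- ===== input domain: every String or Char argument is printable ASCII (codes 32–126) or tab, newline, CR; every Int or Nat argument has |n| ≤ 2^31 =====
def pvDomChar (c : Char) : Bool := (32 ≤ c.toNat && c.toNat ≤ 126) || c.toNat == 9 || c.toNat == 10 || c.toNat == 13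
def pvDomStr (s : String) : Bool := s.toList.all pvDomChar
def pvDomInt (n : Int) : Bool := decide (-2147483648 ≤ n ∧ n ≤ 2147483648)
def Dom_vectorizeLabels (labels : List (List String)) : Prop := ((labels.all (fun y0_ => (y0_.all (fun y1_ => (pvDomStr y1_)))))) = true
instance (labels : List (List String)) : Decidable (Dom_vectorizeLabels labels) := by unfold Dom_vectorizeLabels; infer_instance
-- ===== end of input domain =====

-- B fuses A's two passes into one: ids are assigned via setdefault while each row's vector is built.


-- ===== PORT A =====
-- labelNames[l] never raises: the first pass inserted every label, so getD's default is never used.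
def vectorizeLabels (labels : List (List String)) : List (List Int) × Int :=
  let labelNames : PySem.Dict String Int :=
    labels.foldl (fun d row =>
      row.foldl (fun d l => if d.contains l then d else d.insert l (d.size : Int)) d)
      PySem.Dict.empty
  let vectorizedLabels : List (List Int) :=
    labels.foldl (fun acc row =>
      acc ++ [row.foldl (fun v l => v ++ [labelNames.getD l 0 + 1]) []]) []
  (vectorizedLabels, (labelNames.size : Int))

-- ===== PORT B =====
def vectorizeLabels_alt (labels : List (List String)) : List (List Int) × Int :=
  let st :=
    labels.foldl (fun st row =>
      let r := row.foldl (fun st2 l =>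
          (st2.1.setdefault l (st2.1.size : Int),
           st2.2 ++ [((st2.1.get? l).getD (st2.1.size : Int)) + 1]))
        (st.1, ([] : List Int))
      (r.1, st.2 ++ [r.2]))
      ((PySem.Dict.empty : PySem.Dict String Int), ([] : List (List Int)))
  (st.2, (st.1.size : Int))

-- ===== PRECONDITION & SPEC =====
def Spec_vectorizeLabels (labels : List (List String)) (out : List (List Int) × Int) : Prop := out = vectorizeLabels_alt labels
instance (labels : List (List String)) (out : List (List Int) × Int) : Decidable (Spec_vectorizeLabels labels out) := by unfold Spec_vectorizeLabels; infer_instance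

-- ===== CLAIM (what is proved, stated in full; the proofs are below) =====
def Claim_equal_vectorizeLabels : Prop := ∀ (labels : List (List String)), Dom_vectorizeLabels labels → Spec_vectorizeLabels labels (vectorizeLabels labels)

-- ===== LEMMAS AND PROOFS =====

-- A's id-assigning step and its folds, abstracted for the proofs.
def pvIns (d : PySem.Dict String Int) (l : String) : PySem.Dict String Int :=
  if d.contains l then d else d.insert l (d.size : Int)

def pvRow (d : PySem.Dict String Int) (row : List String) : PySem.Dict String Int :=
  row.foldl pvIns d

def pvAll (d : PySem.Dict String Int) (rows : List (List String)) : PySem.Dict String Int :=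
  rows.foldl pvRow d

-- "D preserves every binding of d"
def pvExt (d D : PySem.Dict String Int) : Prop :=
  ∀ l v, d.get? l = some v → D.get? l = some v

theorem pvExt_trans {d e D : PySem.Dict String Int} (h1 : pvExt d e) (h2 : pvExt e D) : pvExt d D :=
  fun l v h => h2 l v (h1 l v h)

theorem pvExt_ins (d : PySem.Dict String Int) (l : String) : pvExt d (pvIns d l) := by
  intro l' v h
  unfold pvIns
  split
  · exact h
  · next hc =>
    rw [PySem.Dict.get?_insert]
    split
    · next he =>
      subst he
      rw [PySem.Dict.contains_eq_isSome_get?, h] at hc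
      simp at hc
    · exact h

theorem pvExt_row (row : List String) (d : PySem.Dict String Int) : pvExt d (pvRow d row) := by
  induction row generalizing d with
  | nil => exact fun l v h => h
  | cons l row ih =>
    exact pvExt_trans (pvExt_ins d l) (ih (pvIns d l))

theorem pvExt_all (rows : List (List String)) (d : PySem.Dict String Int) : pvExt d (pvAll d rows) := by
  induction rows generalizing d with
  | nil => exact fun l v h => h
  | cons row rows ih =>
    exact pvExt_trans (pvExt_row row d) (ih (pvRow d row))

-- setdefault with default size is exactly A's insertion step
theorem pvSetdefault_eq_ins (d : PySem.Dict String Int) (l : String) :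
    d.setdefault l (d.size : Int) = pvIns d l := by
  unfold pvIns
  by_cases h : d.contains l = true
  · rw [PySem.Dict.setdefault_of_contains _ _ h, if_pos h]
  · rw [PySem.Dict.setdefault_of_not_contains _ _ (by simpa using h)]
    rw [if_neg h]

-- B's inner fold over a row, related to A's table and final-dict lookups
theorem pvRowB (row : List String) (d D : PySem.Dict String Int) (acc : List Int)
    (hD : pvExt (pvRow d row) D) :
    row.foldl (fun st2 l =>
        (st2.1.setdefault l (st2.1.size : Int),
         st2.2 ++ [((st2.1.get? l).getD (st2.1.size : Int)) + 1])) (d, acc)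
    = (pvRow d row, acc ++ row.map (fun l => D.getD l 0 + 1)) := by
  induction row generalizing d acc with
  | nil => simp [pvRow]
  | cons l row ih =>
    have hrow : pvRow d (l :: row) = pvRow (pvIns d l) row := rfl
    rw [hrow] at hD
    have hval : D.getD l 0 = (d.get? l).getD (d.size : Int) := by
      have hext : pvExt (pvIns d l) D := pvExt_trans (pvExt_row row (pvIns d l)) hD
      cases h : d.get? l with
      | some i =>
        have hc : d.contains l = true := by
          rw [PySem.Dict.contains_eq_isSome_get?, h]; rfl
        have : (pvIns d l).get? l = some i := by rw [pvIns, if_pos hc]; exact h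
        have := hext l i this
        simp [PySem.Dict.getD_eq_get?_getD, this]
      | none =>
        have hc : ¬ d.contains l = true := by
          rw [PySem.Dict.contains_eq_isSome_get?, h]; simp
        have : (pvIns d l).get? l = some (d.size : Int) := by
          rw [pvIns, if_neg hc]
          exact PySem.Dict.get?_insert_self _ _ _
        have := hext l _ this
        simp [PySem.Dict.getD_eq_get?_getD, this]
    simp only [List.foldl_cons, List.map_cons]
    rw [pvSetdefault_eq_ins, ih (pvIns d l) (acc ++ [(d.get? l).getD (d.size : Int) + 1]) hD, hval, hrow]
    simp

-- B's outer fold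
theorem pvOuterB (rows : List (List String)) (d D : PySem.Dict String Int) (acc : List (List Int))
    (hD : pvExt (pvAll d rows) D) :
    rows.foldl (fun st row =>
        let r := row.foldl (fun st2 l =>
            (st2.1.setdefault l (st2.1.size : Int),
             st2.2 ++ [((st2.1.get? l).getD (st2.1.size : Int)) + 1])) (st.1, ([] : List Int))
        (r.1, st.2 ++ [r.2])) (d, acc)
    = (pvAll d rows, acc ++ rows.map (fun row => row.map (fun l => D.getD l 0 + 1))) := by
  induction rows generalizing d acc with
  | nil => simp [pvAll]
  | cons row rows ih =>
    have hall : pvAll d (row :: rows) = pvAll (pvRow d row) rows := rfl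
    rw [hall] at hD
    have hrowD : pvExt (pvRow d row) D :=
      pvExt_trans (pvExt_all rows (pvRow d row)) hD
    simp only [List.foldl_cons, List.map_cons]
    rw [pvRowB row d D ([] : List Int) hrowD]
    have hi := ih (pvRow d row) (acc ++ [row.map (fun l => D.getD l 0 + 1)]) hD
    rw [hall]
    simpa using hi

-- A's appending folds are maps
theorem pvFoldPush {α β : Type} (f : α → β) (xs : List α) (acc : List β) :
    xs.foldl (fun v l => v ++ [f l]) acc = acc ++ xs.map f := by
  induction xs generalizing acc with
  | nil => simp
  | cons x xs ih => simp [ih]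

-- ===== VERDICT (by name: the statement is the Claim_ definition above) =====
theorem vectorizeLabels_spec : Claim_equal_vectorizeLabels := by
  intro labels _
  unfold Spec_vectorizeLabels vectorizeLabels vectorizeLabels_alt
  have hrefl : pvExt (pvAll PySem.Dict.empty labels) (pvAll PySem.Dict.empty labels) :=
    fun _ _ h => h
  have hB := pvOuterB labels PySem.Dict.empty (pvAll PySem.Dict.empty labels) [] hrefl
  simp only at hB ⊢
  rw [hB]
  have hA : ∀ D : PySem.Dict String Int,
      labels.foldl (fun acc row =>
        acc ++ [row.foldl (fun v l => v ++ [D.getD l 0 + 1]) []]) ([] : List (List Int))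
      = labels.map (fun row => row.map (fun l => D.getD l 0 + 1)) := by
    intro D
    have hinner : (fun (acc : List (List Int)) (row : List String) =>
        acc ++ [row.foldl (fun v l => v ++ [D.getD l 0 + 1]) []])
        = (fun acc row => acc ++ [row.map (fun l => D.getD l 0 + 1)]) := by
      funext acc row
      rw [pvFoldPush]
      simp
    rw [hinner, pvFoldPush (fun row => row.map (fun l => D.getD l 0 + 1)) labels []]
    simp
  have hd : (labels.foldl (fun d row =>
      row.foldl (fun d l => if d.contains l then d else d.insert l (d.size : Int)) d)
      PySem.Dict.empty) = pvAll PySem.Dict.empty labels := rfl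
  rw [hd, hA (pvAll PySem.Dict.empty labels)]
  simp
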